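-- pv_equiv track=rewrite | github.com/tasogarexerion/taso-swindle | nnue_proxy.py | _parse_sfen_board
-- ===== SOURCE A (Python) =====
-- from typing import Dict, List, Optional, Tuple, Set
--
-- def _parse_sfen_board(board_sfen: str) -> List[List[Optional[Tuple[str, str]]]]:
--     """
--     SFEN ranks are a..i (top to bottom).
--     Each rank lists files from 9 to 1.
--     We store board[rank 1..9][file 1..9].
--     """
--     ranks = board_sfen.split("/")
--     board: List[List[Optional[Tuple[str, str]]]] = [[None for _ in range(10)] for _ in range(10)]
--     if len(ranks) != 9:
--         return board
--
--     for r_idx, row in enumerate(ranks, start=1):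
--         f = 9
--         i = 0
--         while i < len(row) and f >= 1:
--             ch = row[i]
--             if ch.isdigit():
--                 f -= int(ch)
--                 i += 1
--                 continue
--
--             promo = False
--             if ch == "+":
--                 promo = True
--                 i += 1
--                 if i >= len(row):
--                     break
--                 ch = row[i]
--
--             side = "b" if ch.isupper() else "w"
--             pc = ch.upper()
--             piece = ("+" + pc) if promo else pc
--             board[r_idx][f] = (side, piece)
--             f -= 1
--             i += 1
--
--     return board
-- ===== SOURCE B (Python) =====
-- from typing import List, Optional, Tuple
--
-- def _tokens(chars: str):
--     # Stage 1: recursively tokenize a rank into skip counts and piece tuples.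
--     if not chars:
--         return []
--     ch = chars[0]
--     if ch == "+":
--         if len(chars) == 1:
--             return []
--         c = chars[1]
--         return [("b" if c.isupper() else "w", "+" + c.upper())] + _tokens(chars[2:])
--     if ch.isdigit():
--         return [int(ch)] + _tokens(chars[1:])
--     return [("b" if ch.isupper() else "w", ch.upper())] + _tokens(chars[1:])
--
-- def _rank_row(row: str) -> List[Optional[Tuple[str, str]]]:
--     # Stage 2: lay out cells sequentially in file order 9..1 (no file counter).
--     cells: List[Optional[Tuple[str, str]]] = []
--     for tok in _tokens(row):
--         if len(cells) >= 9:
--             break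
--         if isinstance(tok, int):
--             cells.extend([None] * tok)
--         else:
--             cells.append(tok)
--     # Stage 3: pad/truncate to 9 files and flip into board[file] order.
--     cells = (cells + [None] * 9)[:9]
--     return [None] + cells[::-1]
--
-- def _parse_sfen_board(board_sfen: str) -> List[List[Optional[Tuple[str, str]]]]:
--     ranks = board_sfen.split("/")
--     if len(ranks) != 9:
--         return [[None] * 10 for _ in range(10)]
--     return [[None] * 10] + [_rank_row(r) for r in ranks]
-- ===== Notes on version B (the rewrite author's own statement) =====
-- stated objective: alternative
-- what changed: Replaces A's single mutating while-loop with index/lookahead and a file counter by three staged passes per rank: recursively tokenize into skip-counts and pieces, lay cells out sequentially in file order with no file counter, then pad/truncate to 9 and reverse into board order.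
import Mathlib
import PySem

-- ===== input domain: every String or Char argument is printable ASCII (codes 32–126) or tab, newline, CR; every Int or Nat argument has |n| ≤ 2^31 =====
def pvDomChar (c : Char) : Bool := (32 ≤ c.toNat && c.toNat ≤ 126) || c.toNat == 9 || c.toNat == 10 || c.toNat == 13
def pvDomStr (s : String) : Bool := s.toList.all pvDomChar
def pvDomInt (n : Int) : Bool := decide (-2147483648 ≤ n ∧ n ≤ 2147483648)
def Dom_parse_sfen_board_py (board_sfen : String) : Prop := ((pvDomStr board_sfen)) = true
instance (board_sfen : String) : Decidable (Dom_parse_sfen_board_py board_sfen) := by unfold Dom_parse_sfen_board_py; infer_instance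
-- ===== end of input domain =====

-- B replaces A's single mutating while-loop (manual index, '+'-lookahead, file counter)
-- by three staged passes per rank: tokenize, lay out cells sequentially, pad+reverse;
-- objective: alternative decomposition, same cost. Return values proved equal.

-- shared character primitives (Python ch.isupper() / ch.upper())
def pvSide (c : Char) : String := if PySem.Str.isupper c then "b" else "w"
def pvUp (c : Char) : String := PySem.Str.upper (String.ofList [c])

-- ===== PORT A =====
-- A's while loop over the rank string with manual index and '+'-lookahead,
-- mutating the row list in place (row[f] = piece).
def pvALoop : List Char → Int → List (Option (String × String)) → List (Option (String × String))
  | [], _, row => row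
  | ch :: rest, f, row =>
    if 1 ≤ f then
      if PySem.Str.isdigit ch then
        pvALoop rest (f - ((ch.toNat : Int) - 48)) row
      else if ch = '+' then
        match rest with
        | [] => row
        | ch2 :: rest2 =>
          pvALoop rest2 (f - 1) (row.set f.toNat (some (pvSide ch2, "+" ++ pvUp ch2)))
      else
        pvALoop rest (f - 1) (row.set f.toNat (some (pvSide ch, pvUp ch)))
    else row

def parse_sfen_board_py (board_sfen : String) : List (List (Option (String × String))) :=
  let ranks := PySem.Chars.splitOn board_sfen.toList "/".toList
  let board : List (List (Option (String × String))) :=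
    List.replicate 10 (List.replicate 10 none)
  if ranks.length ≠ 9 then board
  else
    (PySem.List.enumerate ranks 1).foldl
      (fun b p => b.set p.1.toNat (pvALoop p.2 9 (b.getD p.1.toNat []))) board

-- ===== PORT B =====
-- stage 1: tokens of a rank — a skip count (digit) or a piece
inductive PvTok where
  | digit : Int → PvTok
  | piece : String × String → PvTok
deriving DecidableEq, Repr

def pvTokens : List Char → List PvTok
  | [] => []
  | ch :: rest =>
    if ch = '+' then
      match rest with
      | [] => []
      | c :: rest2 => PvTok.piece (pvSide c, "+" ++ pvUp c) :: pvTokens rest2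
    else if PySem.Str.isdigit ch then
      PvTok.digit ((ch.toNat : Int) - 48) :: pvTokens rest
    else PvTok.piece (pvSide ch, pvUp ch) :: pvTokens rest

-- stage 2: lay cells out sequentially in file order 9..1 (no file counter)
def pvCells : List PvTok → List (Option (String × String)) → List (Option (String × String))
  | [], cells => cells
  | t :: rest, cells =>
    if 9 ≤ cells.length then cells
    else
      match t with
      | PvTok.digit n => pvCells rest (cells ++ List.replicate n.toNat none)  -- [None]*n, n ≥ 0
      | PvTok.piece p => pvCells rest (cells ++ [some p])

-- stage 3: pad/truncate to 9 files and flip into board[file] order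
def pvRankRow (row : List Char) : List (Option (String × String)) :=
  none :: ((pvCells (pvTokens row) [] ++ List.replicate 9 none).take 9).reverse

def parse_sfen_board_py_alt (board_sfen : String) : List (List (Option (String × String))) :=
  let ranks := PySem.Chars.splitOn board_sfen.toList "/".toList
  if ranks.length ≠ 9 then List.replicate 10 (List.replicate 10 none)
  else List.replicate 10 none :: ranks.map pvRankRow

-- ===== PRECONDITION & SPEC =====
def Spec_parse_sfen_board_py (board_sfen : String) (out : List (List (Option (String × String)))) : Prop := out = parse_sfen_board_py_alt board_sfen
instance (board_sfen : String) (out : List (List (Option (String × String)))) : Decidable (Spec_parse_sfen_board_py board_sfen out) := by unfold Spec_parse_sfen_board_py; infer_instance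

-- ===== CLAIM (what is proved, stated in full; the proofs are below) =====
def Claim_equal_parse_sfen_board_py : Prop := ∀ (board_sfen : String), Dom_parse_sfen_board_py board_sfen → Spec_parse_sfen_board_py board_sfen (parse_sfen_board_py board_sfen)

-- ===== LEMMAS AND PROOFS =====

-- intermediate form of A's loop over tokens instead of characters
def pvTokLoop : List PvTok → Int → List (Option (String × String)) → List (Option (String × String))
  | [], _, row => row
  | t :: rest, f, row =>
    if 1 ≤ f then
      match t with
      | PvTok.digit n => pvTokLoop rest (f - n) row
      | PvTok.piece p => pvTokLoop rest (f - 1) (row.set f.toNat (some p))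
    else row

-- tokenization mirrors A's lookahead exactly
lemma pvALoop_eq_tok (l : List Char) (f : Int) (row : List (Option (String × String))) :
    pvALoop l f row = pvTokLoop (pvTokens l) f row := by
  match l with
  | [] => simp [pvALoop, pvTokens, pvTokLoop]
  | ch :: rest =>
    by_cases hf : 1 ≤ f
    · by_cases hp : ch = '+'
      · subst hp
        match rest with
        | [] => simp [pvALoop.eq_def, pvTokens.eq_def, pvTokLoop.eq_def, hf]
        | c :: rest2 =>
          have hd : PySem.Str.isdigit '+' = false := by decide
          rw [pvALoop.eq_def, pvTokens.eq_def]
          simp only [hf, hd, Bool.false_eq_true, if_pos, if_neg, not_false_iff, pvTokLoop]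
          exact pvALoop_eq_tok rest2 (f - 1) _
      · by_cases hd : PySem.Str.isdigit ch
        · rw [pvALoop.eq_def, pvTokens.eq_def]
          simp only [hf, hd, hp, if_pos, if_neg, not_false_iff, pvTokLoop]
          exact pvALoop_eq_tok rest (f - ((ch.toNat : Int) - 48)) row
        · rw [pvALoop.eq_def, pvTokens.eq_def]
          simp only [hf, hd, hp, Bool.false_eq_true, if_neg, not_false_iff, pvTokLoop]
          exact pvALoop_eq_tok rest (f - 1) _
    · have hA : pvALoop (ch :: rest) f row = row := by
        rw [pvALoop.eq_def]; simp [hf]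
      have hB : pvTokLoop (pvTokens (ch :: rest)) f row = row := by
        cases pvTokens (ch :: rest) with
        | nil => rw [pvTokLoop.eq_def]
        | cons t ts => rw [pvTokLoop.eq_def]; simp [hf]
      rw [hA, hB]
termination_by l.length

-- digit tokens produced by the tokenizer are nonnegative
lemma pvTokens_digit_nonneg (l : List Char) :
    ∀ n, PvTok.digit n ∈ pvTokens l → 0 ≤ n := by
  match l with
  | [] => simp [pvTokens]
  | ch :: rest =>
    intro n hn
    rw [pvTokens.eq_def] at hn
    by_cases hp : ch = '+'
    · subst hp
      simp only [ite_true] at hn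
      match rest, hn with
      | c :: rest2, hn =>
        simp only [List.mem_cons] at hn
        rcases hn with h | h
        · exact absurd h (by simp)
        · exact pvTokens_digit_nonneg rest2 n h
    · by_cases hd : PySem.Str.isdigit ch
      · simp only [hp, hd, ite_true, if_neg, not_false_iff, List.mem_cons] at hn
        rcases hn with h | h
        · have hc : 48 ≤ ch.toNat := by
            unfold PySem.Str.isdigit PySem.Chars.isdigit at hd
            simp only [Bool.and_eq_true, decide_eq_true_eq] at hd
            have h0 := hd.1
            simp [Char.le_def] at h0 ⊢
            exact h0
          injection h with h'
          omega
        · exact pvTokens_digit_nonneg rest n h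
      · simp only [hp, hd, Bool.false_eq_true, if_neg, not_false_iff, List.mem_cons] at hn
        rcases hn with h | h
        · exact absurd h (by simp)
        · exact pvTokens_digit_nonneg rest n h
termination_by l.length

-- the row a cell list denotes (stage 3 applied to a cell list)
def pvRowOf (cells : List (Option (String × String))) : List (Option (String × String)) :=
  none :: ((cells ++ List.replicate 9 none).take 9).reverse

lemma pvTake9 (cells : List (Option (String × String))) (h : cells.length ≤ 9) :
    (cells ++ List.replicate 9 none).take 9
      = cells ++ List.replicate (9 - cells.length) none := by
  rw [List.take_append, List.take_of_length_le h, List.take_replicate,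
    Nat.min_eq_left (by omega)]

-- closed form: for a short cell list the row is leading nones then the cells reversed
lemma pvRowOf_eq (cells : List (Option (String × String))) (h : cells.length ≤ 9) :
    pvRowOf cells = List.replicate (10 - cells.length) none ++ cells.reverse := by
  unfold pvRowOf
  rw [pvTake9 cells h, List.reverse_append, List.reverse_replicate]
  have h10 : 10 - cells.length = (9 - cells.length) + 1 := by omega
  rw [h10, List.replicate_succ]
  simp

lemma pvRowOf_pad (cells : List (Option (String × String))) (k : Nat) :
    pvRowOf (cells ++ List.replicate k none) = pvRowOf cells := by
  unfold pvRowOf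
  congr 2
  rw [List.append_assoc, List.replicate_append_replicate, List.take_append,
    List.take_append, List.take_replicate, List.take_replicate,
    Nat.min_eq_left (by omega), Nat.min_eq_left (by omega)]

lemma pvRowOf_set (cells : List (Option (String × String))) (p : String × String)
    (h : cells.length ≤ 8) :
    (pvRowOf cells).set (9 - cells.length) (some p) = pvRowOf (cells ++ [some p]) := by
  rw [pvRowOf_eq cells (by omega), pvRowOf_eq (cells ++ [some p]) (by simp; omega)]
  simp only [List.length_append, List.length_cons, List.length_nil, Nat.zero_add]
  have h1 : 10 - cells.length = (9 - cells.length) + 1 := by omega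
  have h2 : 10 - (cells.length + 1) = 9 - cells.length := by omega
  rw [h1, h2, List.replicate_succ', List.append_assoc, List.reverse_append]
  simp

-- the invariant: A's token loop at f = 9 - |cells| equals B's staged cell layout
lemma pvTokLoop_eq_cells (toks : List PvTok) (cells : List (Option (String × String)))
    (hwf : ∀ n, PvTok.digit n ∈ toks → 0 ≤ n) :
    pvTokLoop toks (9 - (cells.length : Int)) (pvRowOf cells) = pvRowOf (pvCells toks cells) := by
  induction toks generalizing cells with
  | nil => simp [pvTokLoop, pvCells]
  | cons t rest ih =>
    rw [pvTokLoop.eq_def, pvCells.eq_def]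
    by_cases hlen : 9 ≤ cells.length
    · have hf : ¬ (1 : Int) ≤ 9 - (cells.length : Int) := by omega
      simp [hf, hlen]
    · have hf : (1 : Int) ≤ 9 - (cells.length : Int) := by omega
      simp only [hf, if_pos, hlen, if_neg, not_false_iff]
      match t with
      | PvTok.digit n =>
        dsimp only
        have hn : 0 ≤ n := hwf n (List.mem_cons_self ..)
        have heq : (9 : Int) - (cells.length : Int) - n
            = 9 - (((cells ++ List.replicate n.toNat none).length : Nat) : Int) := by
          simp; omega
        rw [heq, ← pvRowOf_pad cells n.toNat]
        exact ih _ (fun m hm => hwf m (List.mem_cons_of_mem _ hm))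
      | PvTok.piece p =>
        dsimp only
        have htn : ((9 : Int) - (cells.length : Int)).toNat = 9 - cells.length := by omega
        have heq : (9 : Int) - (cells.length : Int) - 1
            = 9 - (((cells ++ [some p]).length : Nat) : Int) := by simp; omega
        rw [htn, pvRowOf_set cells p (by omega), heq]
        exact ih _ (fun m hm => hwf m (List.mem_cons_of_mem _ hm))

lemma pvRowOf_nil :
    pvRowOf [] = [none, none, none, none, none, none, none, none, none, none] := by decide

lemma pvParseRank_eq (r : List Char) :
    pvALoop r 9 [none, none, none, none, none, none, none, none, none, none] = pvRankRow r := by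
  have h0 : pvALoop r 9 [none, none, none, none, none, none, none, none, none, none]
      = pvTokLoop (pvTokens r) (9 - (([] : List (Option (String × String))).length : Int))
          (pvRowOf []) := by
    rw [pvRowOf_nil, pvALoop_eq_tok]
    norm_num
  rw [h0, pvTokLoop_eq_cells _ _ (pvTokens_digit_nonneg r)]
  rfl

theorem parse_sfen_board_py_spec : Claim_equal_parse_sfen_board_py := by
  intro s _
  unfold Spec_parse_sfen_board_py parse_sfen_board_py parse_sfen_board_py_alt
  set ranks := PySem.Chars.splitOn s.toList "/".toList with hranks
  by_cases h9 : ranks.length = 9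
  · simp only [h9, ne_eq, not_true_eq_false, if_false]
    match ranks, h9 with
    | [r1, r2, r3, r4, r5, r6, r7, r8, r9], _ =>
      simp [PySem.List.enumerate_cons, PySem.List.enumerate_nil, List.foldl,
        List.replicate, List.set, List.getD, pvParseRank_eq]
  · simp [h9]
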